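-- pv_equiv track=rewrite | github.com/NorthernCode/SCIVOO | push_database.py | getStartingPeriods
-- ===== SOURCE A (Python) =====
-- def getStartingPeriods(periods):
--     result = ''
--     starts = True
--     for char in periods:
--         if(char == ','):
--             starts = True
--             result += char
--         elif(char == '-'):
--             starts = False
--         elif(starts):
--             result += char
--     return result
-- ===== SOURCE B (Python) =====
-- def getStartingPeriods(periods):
--     return ','.join(piece.split('-')[0] for piece in periods.split(','))
-- ===== Notes on version B (the rewrite author's own statement) =====
-- stated objective: simpler
-- what changed: Replaces the stateful character-by-character scan (with a 'starts' flag toggled by commas and dashes) by a token-level one-liner: split on commas, take each segment's part before its first dash via split('-')[0], rejoin with commas.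
import Mathlib
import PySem

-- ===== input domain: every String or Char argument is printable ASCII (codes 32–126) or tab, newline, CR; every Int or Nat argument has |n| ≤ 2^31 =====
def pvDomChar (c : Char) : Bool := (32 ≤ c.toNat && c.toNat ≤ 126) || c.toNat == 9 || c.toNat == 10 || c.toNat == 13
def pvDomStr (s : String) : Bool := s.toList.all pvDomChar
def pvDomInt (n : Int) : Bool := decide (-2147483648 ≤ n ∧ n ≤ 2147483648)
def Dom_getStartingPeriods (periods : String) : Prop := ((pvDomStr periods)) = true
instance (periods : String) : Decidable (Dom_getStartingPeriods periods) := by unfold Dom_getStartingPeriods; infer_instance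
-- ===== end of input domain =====

-- B rewrites A's stateful character scan as split-on-commas / take-before-dash / rejoin (objective: simpler).

-- ===== PORT A =====
-- the loop body of A: state = (result so far, starts flag)
def pvStepA (st : List Char × Bool) (c : Char) : List Char × Bool :=
  if c = ',' then (st.1 ++ [c], true)
  else if c = '-' then (st.1, false)
  else if st.2 then (st.1 ++ [c], st.2)
  else st

def getStartingPeriods (periods : String) : String :=
  String.ofList (periods.toList.foldl pvStepA ([], true)).1

-- ===== PORT B =====
-- piece.split('-')[0]: split on a nonempty separator is never empty, so [0] is the head
def pvFirstPart (piece : List Char) : List Char :=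
  (PySem.Chars.splitOn piece ['-']).headD []

def getStartingPeriods_alt (periods : String) : String :=
  String.ofList (PySem.Chars.join [','] ((PySem.Chars.splitOn periods.toList [',']).map pvFirstPart))

-- ===== PRECONDITION & SPEC =====
def Spec_getStartingPeriods (periods : String) (out : String) : Prop := out = getStartingPeriods_alt periods
instance (periods : String) (out : String) : Decidable (Spec_getStartingPeriods periods out) := by unfold Spec_getStartingPeriods; infer_instance

-- ===== CLAIM (what is proved, stated in full; the proofs are below) =====
def Claim_equal_getStartingPeriods : Prop := ∀ (periods : String), Dom_getStartingPeriods periods → Spec_getStartingPeriods periods (getStartingPeriods periods)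

-- ===== LEMMAS AND PROOFS =====

-- structural model of splitOn with a single-character separator
def pvSp (d : Char) : List Char → List Char → List (List Char)
  | [], cur => [cur.reverse]
  | c :: rest, cur => if c = d then cur.reverse :: pvSp d rest [] else pvSp d rest (c :: cur)

-- A's remaining output as a structural recursion (accumulator removed)
def pvG : List Char → Bool → List Char
  | [], _ => []
  | c :: cs, b =>
    if c = ',' then ',' :: pvG cs true
    else if c = '-' then pvG cs false
    else if b then c :: pvG cs b
    else pvG cs b

lemma pvSp_cons_eq (d : Char) (rest cur : List Char) :
    pvSp d (d :: rest) cur = cur.reverse :: pvSp d rest [] := by simp [pvSp]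

lemma pvSp_cons_ne {c d : Char} (hc : c ≠ d) (rest cur : List Char) :
    pvSp d (c :: rest) cur = pvSp d rest (c :: cur) := by simp [pvSp, hc]

lemma pvG_comma (cs : List Char) (b : Bool) : pvG (',' :: cs) b = ',' :: pvG cs true := by
  simp [pvG]

lemma pvG_dash (cs : List Char) (b : Bool) : pvG ('-' :: cs) b = pvG cs false := by
  simp [pvG]

lemma pvG_other_true {c : Char} (hc : c ≠ ',') (hd : c ≠ '-') (cs : List Char) :
    pvG (c :: cs) true = c :: pvG cs true := by simp [pvG, hc, hd]

lemma pvG_other_false {c : Char} (hc : c ≠ ',') (hd : c ≠ '-') (cs : List Char) :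
    pvG (c :: cs) false = pvG cs false := by simp [pvG, hc, hd]

lemma pvGo_single (d : Char) : ∀ (fuel : Nat) (l cur : List Char) (acc : List (List Char)), l.length < fuel →
    PySem.Chars.splitOn.go [d] fuel l cur acc = acc.reverse ++ pvSp d l cur := by
  intro fuel
  induction fuel with
  | zero => intro l cur acc h; omega
  | succ n ih =>
    intro l cur acc h
    cases l with
    | nil =>
      rw [show PySem.Chars.splitOn.go [d] (n+1) [] cur acc = (cur.reverse :: acc).reverse from rfl]
      simp [pvSp]
    | cons c rest =>
      rw [show PySem.Chars.splitOn.go [d] (n+1) (c :: rest) cur acc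
          = if List.isPrefixOf [d] (c :: rest) = true then
              PySem.Chars.splitOn.go [d] n (List.drop [d].length (c :: rest)) [] (cur.reverse :: acc)
            else PySem.Chars.splitOn.go [d] n rest (c :: cur) acc from rfl]
      by_cases hc : c = d
      · subst hc
        simp only [List.isPrefixOf, BEq.rfl, Bool.and_true,
          List.length_cons, List.length_nil, List.drop_succ_cons, List.drop_zero]
        rw [ih _ _ _ (by simpa using Nat.lt_of_succ_lt_succ h)]
        simp [pvSp]
      · have hpre : List.isPrefixOf [d] (c :: rest) = false := by
          simp only [List.isPrefixOf, Bool.and_true, beq_eq_false_iff_ne]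
          intro hdc; exact hc hdc.symm
        rw [hpre]
        simp only [Bool.false_eq_true, if_false]
        rw [ih _ _ _ (by simpa using Nat.lt_of_succ_lt_succ h)]
        rw [pvSp_cons_ne hc]

lemma pvSplitOn_eq_sp (d : Char) (l : List Char) :
    PySem.Chars.splitOn l [d] = pvSp d l [] := by
  unfold PySem.Chars.splitOn
  rw [pvGo_single d (l.length + 1) l [] [] (Nat.lt_succ_self _)]
  simp

lemma pvSp_ne_nil (d : Char) (l : List Char) : ∀ cur, pvSp d l cur ≠ [] := by
  induction l with
  | nil => intro cur; simp [pvSp]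
  | cons c rest ih =>
    intro cur
    by_cases hc : c = d
    · subst hc; rw [pvSp_cons_eq]; simp
    · rw [pvSp_cons_ne hc]; exact ih _

lemma pvHeadD_sp (d : Char) (l : List Char) : ∀ cur,
    (pvSp d l cur).headD [] = cur.reverse ++ l.takeWhile (· ≠ d) := by
  induction l with
  | nil => intro cur; simp [pvSp]
  | cons c rest ih =>
    intro cur
    by_cases hc : c = d
    · subst hc; rw [pvSp_cons_eq]; simp [List.takeWhile]
    · rw [pvSp_cons_ne hc, ih (c :: cur)]
      simp [List.takeWhile, hc]

lemma pvFirstPart_eq (p : List Char) : pvFirstPart p = p.takeWhile (· ≠ '-') := by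
  unfold pvFirstPart
  rw [pvSplitOn_eq_sp, pvHeadD_sp]
  simp

lemma pvTW_self {l : List Char} (h : ∀ x ∈ l, x ≠ '-') :
    l.takeWhile (· ≠ '-') = l :=
  List.takeWhile_eq_self_iff.mpr (fun x hx => by simpa using h x hx)

lemma pvTW_all {l m : List Char} (h : ∀ x ∈ l, x ≠ '-') :
    (l ++ m).takeWhile (· ≠ '-') = l ++ m.takeWhile (· ≠ '-') := by
  rw [List.takeWhile_append, pvTW_self h]
  simp

lemma pvTW_mem {l m : List Char} (h : '-' ∈ l) :
    (l ++ m).takeWhile (· ≠ '-') = l.takeWhile (· ≠ '-') := by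
  rw [List.takeWhile_append]
  have hne : (l.takeWhile (fun x => decide (x ≠ '-'))).length ≠ l.length := by
    intro hl
    have := List.takeWhile_eq_self_iff.mp ((List.takeWhile_prefix _).eq_of_length hl)
    simpa using this '-' h
  rw [if_neg hne]

lemma pvMain (cs : List Char) : ∀ cur : List Char,
    ((∀ x ∈ cur, x ≠ '-') →
      PySem.Chars.join [','] ((pvSp ',' cs cur).map pvFirstPart) = cur.reverse ++ pvG cs true)
    ∧ ('-' ∈ cur →
      PySem.Chars.join [','] ((pvSp ',' cs cur).map pvFirstPart) = pvFirstPart cur.reverse ++ pvG cs false) := by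
  induction cs with
  | nil =>
    intro cur
    simp only [pvSp, List.map, PySem.Chars.join_singleton, pvG]
    constructor
    · intro hnd
      rw [pvFirstPart_eq, pvTW_self (fun x hx => hnd x (by simpa using hx))]
      simp
    · intro _; simp
  | cons c rest ih =>
    intro cur
    by_cases hc : c = ','
    · subst hc
      obtain ⟨a, as, hsp⟩ := List.exists_cons_of_ne_nil (pvSp_ne_nil ',' rest [])
      have hjoin : PySem.Chars.join [','] ((pvSp ',' (',' :: rest) cur).map pvFirstPart)
          = pvFirstPart cur.reverse ++ ',' :: pvG rest true := by
        rw [pvSp_cons_eq, hsp]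
        simp only [List.map]
        rw [PySem.Chars.join_cons_cons]
        have h0 := (ih []).1 (by simp)
        rw [hsp] at h0
        simp only [List.map, List.reverse_nil, List.nil_append] at h0
        rw [h0]
        simp
      constructor
      · intro hnd
        rw [hjoin, pvFirstPart_eq, pvTW_self (fun x hx => hnd x (by simpa using hx)), pvG_comma]
      · intro _
        rw [hjoin, pvG_comma]
    · by_cases hd : c = '-'
      · subst hd
        have hsp1 := pvSp_cons_ne hc rest cur
        constructor
        · intro hnd
          rw [hsp1, (ih ('-' :: cur)).2 (List.mem_cons_self), List.reverse_cons,
            pvFirstPart_eq, pvTW_all (fun x hx => hnd x (by simpa using hx)), pvG_dash]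
          simp [List.takeWhile]
        · intro hmem
          rw [hsp1, (ih ('-' :: cur)).2 (List.mem_cons_self), List.reverse_cons,
            pvFirstPart_eq, pvFirstPart_eq, pvTW_mem (by simpa using hmem), pvG_dash]
      · have hsp1 := pvSp_cons_ne (fun h => hc h) rest cur
        constructor
        · intro hnd
          have hnd' : ∀ x ∈ (c :: cur), x ≠ '-' := by
            intro x hx
            rcases List.mem_cons.mp hx with h | h
            · subst h; exact hd
            · exact hnd x h
          rw [hsp1, (ih (c :: cur)).1 hnd', List.reverse_cons, pvG_other_true hc hd]
          simp
        · intro hmem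
          rw [hsp1, (ih (c :: cur)).2 (List.mem_cons_of_mem _ hmem), List.reverse_cons,
            pvFirstPart_eq, pvFirstPart_eq, pvTW_mem (by simpa using hmem),
            pvG_other_false hc hd]

lemma pvFoldl_g (cs : List Char) : ∀ (res : List Char) (b : Bool),
    (cs.foldl pvStepA (res, b)).1 = res ++ pvG cs b := by
  induction cs with
  | nil => intro res b; simp [pvG]
  | cons c rest ih =>
    intro res b
    by_cases hc : c = ','
    · subst hc; simp [pvStepA, pvG, ih]
    · by_cases hd : c = '-'
      · subst hd; simp [pvStepA, hc, pvG, ih]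
      · cases b with
        | true => simp [pvStepA, hc, hd, pvG, ih]
        | false => simp [pvStepA, hc, hd, pvG, ih]

-- ===== VERDICT (by name: the statement is the Claim_ definition above) =====
theorem getStartingPeriods_spec : Claim_equal_getStartingPeriods := by
  intro periods _
  unfold Spec_getStartingPeriods getStartingPeriods getStartingPeriods_alt
  rw [pvFoldl_g, List.nil_append, pvSplitOn_eq_sp]
  have := (pvMain periods.toList []).1 (by simp)
  simp only [List.reverse_nil, List.nil_append] at this
  rw [this]
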